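-- pv_equiv track=rewrite | github.com/Fengchao-531/ssc_LLM_phishing_survey | Datasets/sublist/process_phishyai_s4_hw.py | parse_js_like_strings
-- ===== SOURCE A (Python) =====
-- from typing import Dict, Iterable, List, Sequence, Tuple
--
-- def parse_js_like_strings(text: str) -> List[Tuple[str | None, str]]:
--     pairs: List[Tuple[str | None, str]] = []
--     i = 0
--     n = len(text)
--     while i < n:
--         ch = text[i]
--         if ch != '"':
--             i += 1
--             continue
--
--         start = i + 1
--         i += 1
--         while i < n:
--             if text[i] == '"' and text[i - 1] != "\\":
--                 break
--             i += 1
--         if i >= n: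
--             break
--
--         value = text[start:i]
--         i += 1
--
--         j = start - 2
--         while j >= 0 and text[j].isspace():
--             j -= 1
--
--         key = None
--         if j >= 0 and text[j] == ":":
--             k = j - 1
--             while k >= 0 and (text[k].isalnum() or text[k] in {"_", "-"}):
--                 k -= 1
--             candidate = text[k + 1 : j].strip()
--             key = candidate or None
--
--         pairs.append((key, value))
--     return pairs
-- ===== SOURCE B (Python) =====
-- from typing import List, Tuple
--
--
-- def parse_js_like_strings(text: str) -> List[Tuple[str | None, str]]:
--     # One forward pass: a character-driven state machine. Outside strings it
--     # maintains the trailing identifier run and whether a ':' is still "live"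
--     # (only whitespace since), so no backward scanning is ever needed.
--     pairs: List[Tuple[str | None, str]] = []
--     ident: List[str] = []            # maximal trailing run of alnum/_/- chars
--     pending: tuple | None = None     # (key,) set at ':', killed by non-space
--     in_str = False
--     key: str | None = None
--     value: List[str] = []
--     prev = '"'
--     for c in text:
--         if in_str:
--             if c == '"' and prev != "\\":
--                 pairs.append((key, "".join(value)))
--                 in_str = False
--                 ident = []
--                 pending = None
--             else:
--                 value.append(c)
--                 prev = c
--         elif c == '"':
--             key = pending[0] if pending is not None else None
--             value = []
--             prev = '"'
--             in_str = True
--         elif c.isalnum() or c in "_-":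
--             ident.append(c)
--             pending = None
--         elif c == ":":
--             pending = ("".join(ident) or None,)
--             ident = []
--         elif c.isspace():
--             ident = []
--         else:
--             ident = []
--             pending = None
--     return pairs
-- ===== Notes on version B (the rewrite author's own statement) =====
-- stated objective: alternative
-- what changed: B is a single forward state machine that maintains the trailing identifier run and a live-colon flag while scanning each character once, so A's backward whitespace/identifier scans before every opening quote and its separate inner closing-quote loop disappear.
import Mathlib
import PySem

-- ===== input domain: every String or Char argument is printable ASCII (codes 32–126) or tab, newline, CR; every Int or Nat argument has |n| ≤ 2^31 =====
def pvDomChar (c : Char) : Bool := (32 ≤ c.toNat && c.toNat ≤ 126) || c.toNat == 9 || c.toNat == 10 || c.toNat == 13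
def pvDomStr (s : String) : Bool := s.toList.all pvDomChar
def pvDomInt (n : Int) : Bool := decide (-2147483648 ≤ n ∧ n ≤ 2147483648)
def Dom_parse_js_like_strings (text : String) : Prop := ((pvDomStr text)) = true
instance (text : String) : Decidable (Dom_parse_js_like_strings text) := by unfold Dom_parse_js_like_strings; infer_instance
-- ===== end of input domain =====

-- B replaces A's backward scans with a single forward character-driven state
-- machine (trailing identifier run + "live ':'" flag); same return value, no speed claim proved here.

-- ===== PORT A =====
-- inner 'while i < n: if text[i] == '"' and text[i-1] != "\\": break; i += 1' — returns the exit value of i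
def aFindClose (cs : List Char) (i : Nat) : Nat :=
  if _h : i < cs.length then
    if cs.getD i ' ' = '"' ∧ cs.getD (i - 1) ' ' ≠ '\\' then i else aFindClose cs (i + 1)
  else i
termination_by cs.length - i

theorem aFindClose_ge (cs : List Char) (i : Nat) : i ≤ aFindClose cs i := by
  unfold aFindClose
  split
  · split
    · exact le_refl i
    · exact le_trans (Nat.le_succ i) (aFindClose_ge cs (i + 1))
  · exact le_refl i
termination_by cs.length - i

-- 'while j >= 0 and text[j].isspace(): j -= 1' (j is a Python int, may end at -1)
def aSkipWs (cs : List Char) (j : Int) : Int :=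
  if h : 0 ≤ j ∧ PySem.Chars.isspace (cs.getD j.toNat ' ') = true then aSkipWs cs (j - 1) else j
termination_by (j + 1).toNat
decreasing_by omega

-- 'while k >= 0 and (text[k].isalnum() or text[k] in {"_","-"}): k -= 1'
def aSkipIdent (cs : List Char) (k : Int) : Int :=
  if h : 0 ≤ k ∧ (PySem.Chars.isalnum (cs.getD k.toNat ' ') = true ∨ cs.getD k.toNat ' ' = '_' ∨ cs.getD k.toNat ' ' = '-') then
    aSkipIdent cs (k - 1)
  else k
termination_by (k + 1).toNat
decreasing_by omega

-- the key-computation block of A, for an opening quote at index start - 1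
def aKey (cs : List Char) (start : Nat) : Option String :=
  let j := aSkipWs cs ((start : Int) - 2)
  if 0 ≤ j ∧ cs.getD j.toNat ' ' = ':' then
    let k := aSkipIdent cs (j - 1)
    let candidate := PySem.Chars.strip (PySem.List.slice cs (some (k + 1)) (some j))
    if candidate = [] then none else some (String.ofList candidate)
  else none

-- the outer 'while i < n' loop of A
def aLoop (cs : List Char) (i : Nat) (pairs : List (Option String × String)) :
    List (Option String × String) :=
  if _h : i < cs.length then
    if cs.getD i ' ' ≠ '"' then aLoop cs (i + 1) pairs
    else
      let start := i + 1
      let i2 := aFindClose cs start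
      if cs.length ≤ i2 then pairs
      else
        aLoop cs (i2 + 1)
          (pairs ++ [(aKey cs start, String.ofList (PySem.List.slice cs (some (start : Int)) (some (i2 : Int))))])
  else pairs
termination_by cs.length - i
decreasing_by
  · omega
  · have := aFindClose_ge cs (i + 1); omega

def parse_js_like_strings (text : String) : List (Option String × String) :=
  aLoop text.toList 0 []

-- ===== PORT B =====
-- 'c.isalnum() or c in "_-"'
def identB (c : Char) : Bool := PySem.Chars.isalnum c || c == '_' || c == '-'

-- the for-loop of B: one function per value of the in_str flag, recursing on the
-- remaining characters; bIn carries (key, value, prev), bOut carries (ident, pending)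
mutual
def bIn (cs : List Char) (pairs : List (Option String × String))
    (key : Option String) (value : List Char) (prev : Char) : List (Option String × String) :=
  match cs with
  | [] => pairs
  | c :: rest =>
    if c = '"' ∧ prev ≠ '\\' then
      bOut rest (pairs ++ [(key, String.ofList value)]) [] none
    else
      bIn rest pairs key (value ++ [c]) c

def bOut (cs : List Char) (pairs : List (Option String × String))
    (ident : List Char) (pending : Option (Option String)) : List (Option String × String) :=
  match cs with
  | [] => pairs
  | c :: rest =>
    if c = '"' then
      bIn rest pairs (pending.getD none) [] '"'
    else if identB c then
      bOut rest pairs (ident ++ [c]) none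
    else if c = ':' then
      bOut rest pairs [] (some (if ident = [] then none else some (String.ofList ident)))
    else if PySem.Chars.isspace c then
      bOut rest pairs [] pending
    else
      bOut rest pairs [] none
end

def parse_js_like_strings_alt (text : String) : List (Option String × String) :=
  bOut text.toList [] [] none

-- ===== PRECONDITION & SPEC =====
def Spec_parse_js_like_strings (text : String) (out : List (Option String × String)) : Prop := out = parse_js_like_strings_alt text
instance (text : String) (out : List (Option String × String)) : Decidable (Spec_parse_js_like_strings text out) := by unfold Spec_parse_js_like_strings; infer_instance

-- ===== CLAIM (what is proved, stated in full; the proofs are below) =====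
def Claim_equal_parse_js_like_strings : Prop := ∀ (text : String), Dom_parse_js_like_strings text → Spec_parse_js_like_strings text (parse_js_like_strings text)

-- ===== LEMMAS AND PROOFS =====

-- the canonical machine state after i characters, phrased with A's backward scans
def specIdent (cs : List Char) (i : Nat) : List Char :=
  (List.takeWhile identB (cs.take i).reverse).reverse

def pendingSpec (cs : List Char) (i : Nat) : Option (Option String) :=
  let j := aSkipWs cs ((i : Int) - 1)
  if 0 ≤ j ∧ cs.getD j.toNat ' ' = ':' then
    some (let k := aSkipIdent cs (j - 1)
          let candidate := PySem.Chars.strip (PySem.List.slice cs (some (k + 1)) (some j))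
          if candidate = [] then none else some (String.ofList candidate))
  else none

theorem identChar_not_space (c : Char)
    (h : PySem.Chars.isalnum c = true ∨ c = '_' ∨ c = '-') : PySem.Chars.isspace c = false := by
  rcases h with h | h | h
  · rw [Bool.eq_false_iff]
    intro hsp
    simp only [PySem.Chars.isalnum, PySem.Chars.isalpha, PySem.Chars.isdigit, PySem.Chars.isupper,
      PySem.Chars.islower, Bool.or_eq_true, Bool.and_eq_true, decide_eq_true_eq, Char.le_def,
      UInt32.le_iff_toNat_le] at h
    simp only [PySem.Chars.isspace, Char.toNat, Bool.or_eq_true, Bool.and_eq_true,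
      decide_eq_true_eq] at hsp
    simp at h hsp
    omega
  · subst h; decide
  · subst h; decide

theorem identB_iff (c : Char) :
    identB c = true ↔ (PySem.Chars.isalnum c = true ∨ c = '_' ∨ c = '-') := by
  simp [identB, or_assoc]

theorem identB_not_space (c : Char) (h : identB c = true) : PySem.Chars.isspace c = false :=
  identChar_not_space c ((identB_iff c).mp h)

theorem getD_eq_getElem' (cs : List Char) (s : Nat) (hs : s < cs.length) :
    cs.getD s ' ' = cs[s] := by
  simp [List.getD_eq_getElem?_getD, List.getElem?_eq_getElem hs]

theorem drop_eq_getD_cons (cs : List Char) (s : Nat) (hs : s < cs.length) :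
    cs.drop s = cs.getD s ' ' :: cs.drop (s + 1) := by
  rw [getD_eq_getElem' cs s hs]
  exact List.drop_eq_getElem_cons hs

theorem take_succ_concat (cs : List Char) (t : Nat) (ht : t < cs.length) :
    cs.take (t + 1) = cs.take t ++ [cs.getD t ' '] := by
  rw [getD_eq_getElem' cs t ht, List.take_add_one, List.getElem?_eq_getElem ht]; rfl

theorem skipWs_le (cs : List Char) (j : Int) : aSkipWs cs j ≤ j := by
  rw [aSkipWs]
  split
  · have := skipWs_le cs (j - 1); omega
  · omega
termination_by (j + 1).toNat
decreasing_by omega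

theorem skipIdent_le (cs : List Char) (k : Int) : aSkipIdent cs k ≤ k := by
  rw [aSkipIdent]
  split
  · have := skipIdent_le cs (k - 1); omega
  · omega
termination_by (k + 1).toNat
decreasing_by omega

theorem skipIdent_ge (cs : List Char) (k : Int) (h : -1 ≤ k) : -1 ≤ aSkipIdent cs k := by
  rw [aSkipIdent]
  split
  · exact skipIdent_ge cs (k - 1) (by omega)
  · omega
termination_by (k + 1).toNat
decreasing_by omega

theorem skipWs_neg_one (cs : List Char) : aSkipWs cs (-1) = -1 := by
  rw [aSkipWs]; simp

theorem skipIdent_neg_one (cs : List Char) : aSkipIdent cs (-1) = -1 := by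
  rw [aSkipIdent]; simp

theorem skipWs_notspace (cs : List Char) (i : Nat)
    (h : PySem.Chars.isspace (cs.getD i ' ') = false) : aSkipWs cs (i : Int) = (i : Int) := by
  rw [aSkipWs]
  rw [dif_neg]
  rintro ⟨-, hc⟩
  rw [Int.toNat_natCast] at hc
  rw [h] at hc
  exact absurd hc (by decide)

theorem skipWs_space (cs : List Char) (i : Nat)
    (h : PySem.Chars.isspace (cs.getD i ' ') = true) :
    aSkipWs cs (i : Int) = aSkipWs cs ((i : Int) - 1) := by
  rw [aSkipWs]
  rw [dif_pos ⟨by omega, by rwa [Int.toNat_natCast]⟩]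

-- specIdent step
theorem specIdent_zero (cs : List Char) : specIdent cs 0 = [] := by simp [specIdent]

theorem specIdent_succ (cs : List Char) (i : Nat) (hi : i < cs.length) :
    specIdent cs (i + 1) =
      if identB (cs.getD i ' ') then specIdent cs i ++ [cs.getD i ' '] else [] := by
  unfold specIdent
  rw [take_succ_concat cs i hi]
  simp only [List.reverse_append, List.reverse_cons, List.reverse_nil, List.nil_append,
    List.cons_append, List.takeWhile_cons]
  split_ifs with h <;> simp

-- pendingSpec steps
theorem pendingSpec_zero (cs : List Char) : pendingSpec cs 0 = none := by
  unfold pendingSpec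
  rw [show ((0 : Nat) : Int) - 1 = -1 by norm_num, skipWs_neg_one]
  simp

theorem pendingSpec_succ_space (cs : List Char) (i : Nat)
    (h : PySem.Chars.isspace (cs.getD i ' ') = true) :
    pendingSpec cs (i + 1) = pendingSpec cs i := by
  unfold pendingSpec
  rw [show ((i + 1 : Nat) : Int) - 1 = (i : Int) by push_cast; ring, skipWs_space cs i h]

theorem pendingSpec_succ_notspace (cs : List Char) (i : Nat)
    (hs : PySem.Chars.isspace (cs.getD i ' ') = false) (hc : cs.getD i ' ' ≠ ':') :
    pendingSpec cs (i + 1) = none := by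
  unfold pendingSpec
  rw [show ((i + 1 : Nat) : Int) - 1 = (i : Int) by push_cast; ring, skipWs_notspace cs i hs]
  rw [if_neg]
  rintro ⟨-, hcol⟩
  rw [Int.toNat_natCast] at hcol
  exact hc hcol

-- backward ident scan = trailing identB run of the prefix
theorem backIdent (cs : List Char) (i : Nat) (hi : i ≤ cs.length) :
    PySem.List.slice cs (some (aSkipIdent cs ((i : Int) - 1) + 1)) (some (i : Int)) =
      specIdent cs i := by
  induction i with
  | zero =>
    rw [show ((0 : Nat) : Int) - 1 = -1 by norm_num, skipIdent_neg_one]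
    rw [show (-1 : Int) + 1 = ((0 : Nat) : Int) by norm_num]
    rw [PySem.List.slice_natCast]
    simp [specIdent_zero]
  | succ i ih =>
    have hilt : i < cs.length := by omega
    rw [show ((i + 1 : Nat) : Int) - 1 = (i : Int) by push_cast; ring]
    rw [specIdent_succ cs i hilt]
    by_cases hid : identB (cs.getD i ' ') = true
    · have hstep : aSkipIdent cs (i : Int) = aSkipIdent cs ((i : Int) - 1) := by
        rw [aSkipIdent]
        rw [dif_pos ⟨by omega, by rw [Int.toNat_natCast]; exact (identB_iff _).mp hid⟩]
      rw [hstep, if_pos hid]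
      have hge : -1 ≤ aSkipIdent cs ((i : Int) - 1) := skipIdent_ge cs _ (by omega)
      have hle : aSkipIdent cs ((i : Int) - 1) ≤ (i : Int) - 1 := skipIdent_le cs _
      set k := aSkipIdent cs ((i : Int) - 1) with hk
      have hm : k + 1 = (((k + 1).toNat : Nat) : Int) := by omega
      have hmle : (k + 1).toNat ≤ i := by omega
      rw [hm] at ih ⊢
      rw [PySem.List.slice_natCast] at ih ⊢
      set m := (k + 1).toNat
      have htake : (cs.drop m).take (i + 1 - m) = (cs.drop m).take (i - m) ++ [cs.getD i ' '] := by
        rw [show i + 1 - m = (i - m) + 1 by omega, List.take_add_one]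
        rw [List.getElem?_drop, show m + (i - m) = i by omega, List.getElem?_eq_getElem hilt,
          getD_eq_getElem' cs i hilt]
        rfl
      rw [htake, ih (by omega)]
    · have hstep : aSkipIdent cs (i : Int) = (i : Int) := by
        rw [aSkipIdent]
        rw [dif_neg]
        rintro ⟨-, hcon⟩
        rw [Int.toNat_natCast] at hcon
        exact absurd ((identB_iff _).mpr hcon) (by simpa using hid)
      rw [hstep, if_neg hid]
      rw [show (i : Int) + 1 = ((i + 1 : Nat) : Int) by push_cast; ring, PySem.List.slice_natCast]
      simp

theorem specIdent_mem (cs : List Char) (i : Nat) (x : Char) (hx : x ∈ specIdent cs i) :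
    identB x = true := by
  unfold specIdent at hx
  rw [List.mem_reverse] at hx
  exact List.mem_takeWhile_imp hx

theorem strip_no_space (l : List Char) (h : ∀ c ∈ l, PySem.Chars.isspace c = false) :
    PySem.Chars.strip l = l := by
  have hl : List.dropWhile PySem.Chars.isspace l = l := by
    cases l with
    | nil => rfl
    | cons a t =>
      rw [List.dropWhile_cons, if_neg (by simp [h a List.mem_cons_self])]
  have hr : List.dropWhile PySem.Chars.isspace l.reverse = l.reverse := by
    cases hrev : l.reverse with
    | nil => rfl
    | cons a t =>
      rw [List.dropWhile_cons, if_neg (by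
        have : a ∈ l := by
          rw [← List.mem_reverse, hrev]; exact List.mem_cons_self
        simp [h a this])]
  simp [PySem.Chars.strip, PySem.Chars.lstrip, PySem.Chars.rstrip, hl, hr]

theorem pendingSpec_succ_colon (cs : List Char) (i : Nat) (hi : i < cs.length)
    (h : cs.getD i ' ' = ':') :
    pendingSpec cs (i + 1) =
      some (if specIdent cs i = [] then none else some (String.ofList (specIdent cs i))) := by
  have hns : PySem.Chars.isspace (cs.getD i ' ') = false := by rw [h]; decide
  unfold pendingSpec
  rw [show ((i + 1 : Nat) : Int) - 1 = (i : Int) by push_cast; ring, skipWs_notspace cs i hns]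
  rw [if_pos ⟨by omega, by rw [Int.toNat_natCast]; exact h⟩]
  have hb := backIdent cs i (by omega)
  have hstrip : PySem.Chars.strip (specIdent cs i) = specIdent cs i :=
    strip_no_space _ (fun c hc => identB_not_space c (specIdent_mem cs i c hc))
  simp only [hb, hstrip]

-- A's key = the pending component of the spec state
theorem pend_key (cs : List Char) (i : Nat) :
    aKey cs (i + 1) = (pendingSpec cs i).getD none := by
  unfold aKey pendingSpec
  rw [show ((i + 1 : Nat) : Int) - 2 = (i : Int) - 1 by push_cast; ring]
  dsimp only
  split <;> rfl

-- the hit of aFindClose is a quote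
theorem aFindClose_hit (cs : List Char) (s : Nat) (h : aFindClose cs s < cs.length) :
    cs.getD (aFindClose cs s) ' ' = '"' := by
  by_cases h1 : s < cs.length
  · by_cases hc : cs.getD s ' ' = '"' ∧ cs.getD (s - 1) ' ' ≠ '\\'
    · have he : aFindClose cs s = s := by rw [aFindClose]; rw [dif_pos h1, if_pos hc]
      rw [he]; exact hc.1
    · have he : aFindClose cs s = aFindClose cs (s + 1) := by
        rw [aFindClose]; rw [dif_pos h1, if_neg hc]
      rw [he] at h ⊢
      exact aFindClose_hit cs (s + 1) h
  · have he : aFindClose cs s = s := by rw [aFindClose]; rw [dif_neg h1]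
    rw [he] at h; omega
termination_by cs.length - s
decreasing_by omega

-- the in-string phase of B tracks A's closing-quote scan
theorem bIn_eq (cs : List Char) (p : Nat) (hp1 : 1 ≤ p) (hpn : p ≤ cs.length)
    (pairs : List (Option String × String)) (key : Option String) (acc : List Char) :
    bIn (cs.drop p) pairs key acc (cs.getD (p - 1) ' ') =
      if aFindClose cs p < cs.length then
        bOut (cs.drop (aFindClose cs p + 1))
          (pairs ++ [(key, String.ofList (acc ++ (cs.drop p).take (aFindClose cs p - p)))]) [] none
      else pairs := by
  by_cases hlt : p < cs.length
  · rw [drop_eq_getD_cons cs p hlt, bIn]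
    by_cases hc : cs.getD p ' ' = '"' ∧ cs.getD (p - 1) ' ' ≠ '\\'
    · have hcl : aFindClose cs p = p := by rw [aFindClose]; rw [dif_pos hlt, if_pos hc]
      rw [if_pos hc, hcl, if_pos hlt]
      simp
    · have hcl : aFindClose cs p = aFindClose cs (p + 1) := by
        rw [aFindClose]; rw [dif_pos hlt, if_neg hc]
      rw [if_neg hc, hcl]
      have hrec := bIn_eq cs (p + 1) (by omega) (by omega) pairs key (acc ++ [cs.getD p ' '])
      rw [show p + 1 - 1 = p by omega] at hrec
      rw [hrec]
      have hge := aFindClose_ge cs (p + 1)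
      by_cases hfl : aFindClose cs (p + 1) < cs.length
      · rw [if_pos hfl, if_pos hfl]
        have hval : acc ++ (cs.getD p ' ' :: cs.drop (p + 1)).take (aFindClose cs (p + 1) - p) =
            (acc ++ [cs.getD p ' ']) ++ (cs.drop (p + 1)).take (aFindClose cs (p + 1) - (p + 1)) := by
          rw [show aFindClose cs (p + 1) - p = (aFindClose cs (p + 1) - (p + 1)) + 1 by omega,
            List.take_succ_cons]
          simp
        rw [hval]
      · rw [if_neg hfl, if_neg hfl]
  · have hpe : p = cs.length := by omega
    subst hpe
    rw [List.drop_length, bIn]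
    have : aFindClose cs cs.length = cs.length := by rw [aFindClose]; rw [dif_neg (by omega)]
    rw [this, if_neg (by omega)]
termination_by cs.length - p
decreasing_by omega

-- the out-of-string phase of B, started from the canonical state, tracks A's outer loop
theorem bOut_eq (cs : List Char) (i : Nat) (hi : i ≤ cs.length)
    (pairs : List (Option String × String)) :
    bOut (cs.drop i) pairs (specIdent cs i) (pendingSpec cs i) = aLoop cs i pairs := by
  by_cases hlt : i < cs.length
  · rw [drop_eq_getD_cons cs i hlt, bOut, aLoop, dif_pos hlt]
    set c := cs.getD i ' ' with hc
    by_cases hq : c = '"'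
    · rw [if_pos hq, if_neg (not_not_intro hq)]
      have hkey : (pendingSpec cs i).getD none = aKey cs (i + 1) := (pend_key cs i).symm
      have hbin := bIn_eq cs (i + 1) (by omega) (by omega) pairs ((pendingSpec cs i).getD none) []
      rw [show i + 1 - 1 = i by omega, ← hc, hq] at hbin
      rw [hbin]
      dsimp only
      have hge := aFindClose_ge cs (i + 1)
      by_cases hfl : aFindClose cs (i + 1) < cs.length
      · rw [if_pos hfl, if_neg (by omega)]
        have hqhit : cs.getD (aFindClose cs (i + 1)) ' ' = '"' := aFindClose_hit cs (i + 1) hfl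
        have hid2 : specIdent cs (aFindClose cs (i + 1) + 1) = [] := by
          rw [specIdent_succ cs _ hfl, hqhit, if_neg (by decide)]
        have hpd2 : pendingSpec cs (aFindClose cs (i + 1) + 1) = none := by
          refine pendingSpec_succ_notspace cs _ ?_ ?_ <;> rw [hqhit] <;> decide
        have hrec := bOut_eq cs (aFindClose cs (i + 1) + 1) (by omega)
          (pairs ++ [((pendingSpec cs i).getD none,
            String.ofList ([] ++ (cs.drop (i + 1)).take (aFindClose cs (i + 1) - (i + 1))))])
        rw [hid2, hpd2] at hrec
        rw [hrec, hkey]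
        rw [show ((i + 1 : Nat) : Int) = ((i + 1 : Nat) : Int) from rfl]
        rw [PySem.List.slice_natCast]
        simp
      · rw [if_neg hfl, if_pos (by omega)]
    · rw [if_neg hq, if_pos hq]
      have hrec := bOut_eq cs (i + 1) (by omega) pairs
      by_cases hid : identB c = true
      · rw [if_pos hid]
        have h1 : specIdent cs (i + 1) = specIdent cs i ++ [c] := by
          rw [specIdent_succ cs i hlt, ← hc, if_pos hid]
        have h2 : pendingSpec cs (i + 1) = none := by
          refine pendingSpec_succ_notspace cs i ?_ ?_
          · rw [← hc]; exact identB_not_space c hid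
          · rw [← hc]
            intro hcon
            rw [hcon] at hid
            exact absurd hid (by decide)
        rw [h1, h2] at hrec
        exact hrec
      · rw [if_neg hid]
        by_cases hcol : c = ':'
        · rw [if_pos hcol]
          have h1 : specIdent cs (i + 1) = [] := by
            rw [specIdent_succ cs i hlt, ← hc, if_neg hid]
          have h2 : pendingSpec cs (i + 1) =
              some (if specIdent cs i = [] then none else some (String.ofList (specIdent cs i))) :=
            pendingSpec_succ_colon cs i hlt (by rw [← hc]; exact hcol)
          rw [h1, h2] at hrec
          exact hrec
        · rw [if_neg hcol]
          by_cases hsp : PySem.Chars.isspace c = true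
          · rw [if_pos hsp]
            have h1 : specIdent cs (i + 1) = [] := by
              rw [specIdent_succ cs i hlt, ← hc, if_neg hid]
            have h2 : pendingSpec cs (i + 1) = pendingSpec cs i :=
              pendingSpec_succ_space cs i (by rw [← hc]; exact hsp)
            rw [h1, h2] at hrec
            exact hrec
          · rw [if_neg hsp]
            have h1 : specIdent cs (i + 1) = [] := by
              rw [specIdent_succ cs i hlt, ← hc, if_neg hid]
            have h2 : pendingSpec cs (i + 1) = none := by
              refine pendingSpec_succ_notspace cs i ?_ ?_ <;> rw [← hc]
              · simpa using hsp
              · exact hcol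
            rw [h1, h2] at hrec
            exact hrec
  · have hie : i = cs.length := by omega
    subst hie
    rw [List.drop_length, bOut, aLoop, dif_neg (by omega)]
termination_by cs.length - i
decreasing_by
  · have := aFindClose_ge cs (i + 1); omega
  all_goals omega

-- ===== VERDICT (by name: the statement is the Claim_ definition above) =====
theorem parse_js_like_strings_spec : Claim_equal_parse_js_like_strings := by
  intro text _
  unfold Spec_parse_js_like_strings parse_js_like_strings parse_js_like_strings_alt
  have h := bOut_eq text.toList 0 (Nat.zero_le _) []
  rw [specIdent_zero, pendingSpec_zero, List.drop_zero] at h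
  exact h.symm
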